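-- pv_equiv track=rewrite | github.com/chayeshkumar/CTI-project | feeds.py | _looks_like_ip
-- ===== SOURCE A (Python) =====
-- def _looks_like_ip(s: str) -> bool:
--     # simple detection
--     try:
--         parts = s.split(".")
--         if len(parts) == 4 and all(p.isdigit() for p in parts):
--             return True
--     except Exception:
--         pass
--     return False
-- ===== SOURCE B (Python) =====
-- def _looks_like_ip(s: str) -> bool:
--     # One-pass scan: count segments and track validity of the current segment.
--     segs = 1
--     cur_has_char = False
--     cur_ok = True
--     for c in s:
--         if c == '.':
--             if not (cur_has_char and cur_ok):
--                 return False
--             segs += 1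
--             cur_has_char = False
--             cur_ok = True
--         else:
--             cur_has_char = True
--             cur_ok = cur_ok and c.isdigit()
--     return segs == 4 and cur_has_char and cur_ok
-- ===== Notes on version B (the rewrite author's own statement) =====
-- stated objective: alternative
-- what changed: Replaced splitting the string on dots into a list of parts followed by length-4 and all-digits checks with a single character-by-character scan that counts segments and tracks whether the current segment is non-empty and all digits, bailing out early at a dot that closes a bad segment.
import Mathlib
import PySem

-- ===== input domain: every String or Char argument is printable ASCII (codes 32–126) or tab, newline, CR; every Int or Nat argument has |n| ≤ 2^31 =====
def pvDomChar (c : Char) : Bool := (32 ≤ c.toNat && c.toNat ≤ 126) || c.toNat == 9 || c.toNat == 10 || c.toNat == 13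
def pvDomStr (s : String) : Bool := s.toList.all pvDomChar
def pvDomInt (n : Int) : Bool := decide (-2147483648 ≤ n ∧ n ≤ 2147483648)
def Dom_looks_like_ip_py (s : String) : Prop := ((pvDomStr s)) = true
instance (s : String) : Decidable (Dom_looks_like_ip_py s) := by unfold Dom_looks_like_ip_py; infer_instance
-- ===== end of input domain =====

-- B replaces split('.') + len/all checks with a single char-by-char scan counting segments; same cost, different decomposition.

-- ===== PORT A =====
-- parts = s.split("."); return len(parts) == 4 and all(p.isdigit() for p in parts)
-- (the try/except never fires for a str argument: split/isdigit raise nothing)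
def looks_like_ip_py (s : String) : Bool :=
  let parts := PySem.Chars.splitOn s.toList ['.']
  if parts.length == 4 && parts.all PySem.Chars.strIsdigit then true else false

-- ===== PORT B =====
-- state: some (segs, cur_has_char, cur_ok); none encodes Source B's early 'return False'
def pvAltStep (st : Option (Nat × Bool × Bool)) (c : Char) : Option (Nat × Bool × Bool) :=
  match st with
  | none => none
  | some (segs, curHas, curOk) =>
    if c = '.' then
      if curHas && curOk then some (segs + 1, false, true) else none
    else
      some (segs, true, curOk && PySem.Chars.isdigit c)

def looks_like_ip_py_alt (s : String) : Bool :=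
  match s.toList.foldl pvAltStep (some (1, false, true)) with
  | none => false
  | some (segs, curHas, curOk) => segs == 4 && curHas && curOk

-- ===== PRECONDITION & SPEC =====
def Spec_looks_like_ip_py (s : String) (out : Bool) : Prop := out = looks_like_ip_py_alt s
instance (s : String) (out : Bool) : Decidable (Spec_looks_like_ip_py s out) := by unfold Spec_looks_like_ip_py; infer_instance

-- ===== CLAIM (what is proved, stated in full; the proofs are below) =====
def Claim_equal_looks_like_ip_py : Prop := ∀ (s : String), Dom_looks_like_ip_py s → Spec_looks_like_ip_py s (looks_like_ip_py s)

-- ===== LEMMAS AND PROOFS =====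

-- Reference single-char split (proof-side only): splitOn cs ['.'] with accumulator cur.
def pvSplit : List Char → List Char → List (List Char)
  | [], cur => [cur.reverse]
  | c :: rest, cur => if c = '.' then cur.reverse :: pvSplit rest [] else pvSplit rest (c :: cur)

theorem pv_go_nil (n : Nat) (cur : List Char) (acc : List (List Char)) :
    PySem.Chars.splitOn.go ['.'] (n+1) [] cur acc = (cur.reverse :: acc).reverse := rfl

theorem pv_go_cons (n : Nat) (c : Char) (rest cur : List Char) (acc : List (List Char)) :
    PySem.Chars.splitOn.go ['.'] (n+1) (c :: rest) cur acc
      = if List.isPrefixOf ['.'] (c :: rest)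
        then PySem.Chars.splitOn.go ['.'] n rest [] (cur.reverse :: acc)
        else PySem.Chars.splitOn.go ['.'] n rest (c :: cur) acc := rfl

theorem pvSplitOn_go_eq (fuel : Nat) (l cur : List Char) (acc : List (List Char))
    (h : l.length < fuel) :
    PySem.Chars.splitOn.go ['.'] fuel l cur acc = acc.reverse ++ pvSplit l cur := by
  induction fuel generalizing l cur acc with
  | zero => omega
  | succ n ih =>
    cases l with
    | nil => rw [pv_go_nil]; simp [pvSplit]
    | cons c rest =>
      rw [pv_go_cons]
      by_cases hc : c = '.'
      · subst hc
        have hp : List.isPrefixOf ['.'] ('.' :: rest) = true := by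
          simp [List.isPrefixOf]
        simp only [hp, if_true]
        rw [ih rest [] (cur.reverse :: acc) (by simp at h; omega)]
        simp [pvSplit]
      · have hp : List.isPrefixOf ['.'] (c :: rest) = false := by
          simp only [List.isPrefixOf, Bool.and_eq_false_iff, beq_eq_false_iff_ne, ne_eq]
          exact Or.inl fun hh => hc hh.symm
        simp only [hp, Bool.false_eq_true, if_false]
        rw [ih rest (c :: cur) acc (by simp at h; omega)]
        simp [pvSplit, hc]

theorem pvSplitOn_eq (cs : List Char) :
    PySem.Chars.splitOn cs ['.'] = pvSplit cs [] := by
  unfold PySem.Chars.splitOn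
  simpa using pvSplitOn_go_eq (cs.length + 1) cs [] [] (by omega)

def pvFinal (st : Option (Nat × Bool × Bool)) : Bool :=
  match st with
  | none => false
  | some (segs, curHas, curOk) => segs == 4 && curHas && curOk

theorem pvMain (cs cur : List Char) (segs : Nat) (hs : 1 ≤ segs) :
    pvFinal (cs.foldl pvAltStep (some (segs, !cur.isEmpty, cur.all PySem.Chars.isdigit)))
      = ((segs - 1 + (pvSplit cs cur).length == 4)
          && (pvSplit cs cur).all PySem.Chars.strIsdigit) := by
  induction cs generalizing cur segs with
  | nil =>
    simp only [List.foldl_nil, pvFinal, pvSplit, List.length_cons, List.length_nil,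
      List.all_cons, List.all_nil, Bool.and_true, PySem.Chars.strIsdigit]
    have h1 : segs - 1 + 1 = segs := by omega
    rw [h1]
    simp [List.isEmpty_reverse, List.all_reverse, Bool.and_assoc]
  | cons c rest ih =>
    by_cases hc : c = '.'
    · subst hc
      by_cases hgood : (!cur.isEmpty && cur.all PySem.Chars.isdigit) = true
      · simp only [List.foldl_cons, pvAltStep, hgood, if_pos]
        have := ih ([] : List Char) (segs + 1) (by omega)
        simp only [List.isEmpty_nil, Bool.not_true, List.all_nil] at this
        rw [this]
        simp only [pvSplit, if_pos, List.length_cons, List.all_cons]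
        have hlen : segs + 1 - 1 + (pvSplit rest []).length
            = segs - 1 + ((pvSplit rest []).length + 1) := by omega
        rw [hlen]
        have hdig : PySem.Chars.strIsdigit cur.reverse = true := by
          simp only [PySem.Chars.strIsdigit, List.isEmpty_reverse, List.all_reverse]
          exact hgood
        simp [hdig]
      · simp only [List.foldl_cons, pvAltStep, if_neg hgood, if_pos]
        have hnone : ∀ l : List Char, l.foldl pvAltStep none = none := by
          intro l; induction l with
          | nil => rfl
          | cons a t iht => simp [pvAltStep, iht]
        rw [hnone]
        have hdig : PySem.Chars.strIsdigit cur.reverse = false := by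
          simp only [PySem.Chars.strIsdigit, List.isEmpty_reverse, List.all_reverse]
          simpa using hgood
        simp [pvFinal, pvSplit, hdig]
    · simp only [List.foldl_cons, pvAltStep, if_neg hc]
      have := ih (c :: cur) segs hs
      simp only [List.isEmpty_cons, Bool.not_false, List.all_cons] at this
      rw [Bool.and_comm] at this
      rw [this]
      simp [pvSplit, hc]

-- ===== VERDICT (by name: the statement is the Claim_ definition above) =====
theorem looks_like_ip_py_spec : Claim_equal_looks_like_ip_py := by
  intro s _
  unfold Spec_looks_like_ip_py looks_like_ip_py
  rw [pvSplitOn_eq]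
  have h := pvMain s.toList [] 1 (by omega)
  simp only [List.isEmpty_nil, Bool.not_true, List.all_nil] at h
  have h2 : looks_like_ip_py_alt s
      = pvFinal (s.toList.foldl pvAltStep (some (1, false, true))) := rfl
  rw [h2, h]
  simp only [Nat.sub_self, Nat.zero_add]
  apply Bool.eq_iff_iff.mpr
  simp [List.all_eq_true]
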